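-- pv_equiv track=rewrite | github.com/abomhold/multimodal-ml | text/masumi-rnn.py | create_sequence_and_label
-- ===== SOURCE A (Python) =====
-- def create_sequence_and_label(raw_text, char_to_index, seq_length):
--     sequences = []
--     labels = []
--
--     for i in range(len(raw_text) - seq_length):
--         # Select the sequence of characters
--         sequence = raw_text[i:i + seq_length]
--         # Select the next output character
--         label = raw_text[i + seq_length]
--         # Store the sequence & labels
--         sequences.append([char_to_index[char] for char in sequence])
--         labels.append(char_to_index[label])
--
--     return sequences, labels
-- ===== SOURCE B (Python) =====
-- def create_sequence_and_label(raw_text, char_to_index, seq_length):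
--     # Single pass with a sliding-window accumulator: no index arithmetic, no slicing of
--     # the text; each full window is emitted and then rolled forward by one element.
--     if len(raw_text) <= seq_length:
--         return [], []
--     sequences, labels, window = [], [], []
--     for ch in raw_text:
--         j = char_to_index[ch]
--         if len(window) == seq_length:
--             sequences.append(window)
--             labels.append(j)
--             window = (window + [j])[1:]
--         else:
--             window = window + [j]
--     return sequences, labels
-- ===== Notes on version B (the rewrite author's own statement) =====
-- stated objective: alternative
-- what changed: B makes a single pass over the characters with a sliding-window accumulator (emit the full window and its next-index label, then roll the window forward by one), instead of A's loop over window start positions that re-slices the text and re-maps every window.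
-- intended difference: For negative seq_length with -seq_length <= len(raw_text), A returns accidental data (mostly-empty windows from negative-length slices and labels read via Python's negative-index wraparound) while B returns ([], []); no valid windows exist for a negative window length, so the empty result is the intended value. — e.g. on create_sequence_and_label("ab", [("a", 0), ("b", 1)], -1): A returns ([[0], [], []], [1, 0, 1]), B returns ([], [])
import Mathlib
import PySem

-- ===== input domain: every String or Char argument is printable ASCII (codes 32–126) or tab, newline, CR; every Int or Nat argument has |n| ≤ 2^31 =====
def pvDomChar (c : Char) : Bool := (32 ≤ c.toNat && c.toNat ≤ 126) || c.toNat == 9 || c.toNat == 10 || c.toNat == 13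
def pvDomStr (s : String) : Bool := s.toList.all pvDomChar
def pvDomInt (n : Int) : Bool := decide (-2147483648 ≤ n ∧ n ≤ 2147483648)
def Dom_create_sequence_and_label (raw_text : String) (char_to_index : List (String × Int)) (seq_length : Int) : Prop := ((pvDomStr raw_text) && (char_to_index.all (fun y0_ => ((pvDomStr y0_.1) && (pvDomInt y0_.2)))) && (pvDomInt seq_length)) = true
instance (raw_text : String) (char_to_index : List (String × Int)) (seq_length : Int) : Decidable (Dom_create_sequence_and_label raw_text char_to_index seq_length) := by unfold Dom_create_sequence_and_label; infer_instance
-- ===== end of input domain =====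

-- B replaces A's loop over window start positions (with per-window slicing and mapping) by a
-- single pass over the characters maintaining a sliding-window accumulator; return value only.

-- d[k] for the dict-as-association-list (first match); none = KeyError (excluded by Pre_)
def pvLookup (d : List (String × Int)) (c : Char) : Option Int :=
  (d.find? (fun p => p.1.toList == [c])).map (·.2)

-- ===== PORT A =====
-- Literal port of A's loop: fold over range(len(raw_text) - seq_length), appending the
-- mapped window slice and the looked-up label.  Where Python raises (KeyError on a missing
-- character, IndexError on raw_text[i+seq_length]) the Option is none; Pre_ excludes
-- exactly those inputs, so the `.getD 0` default is never observed inside Pre_.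
def create_sequence_and_label (raw_text : String) (char_to_index : List (String × Int)) (seq_length : Int) : List (List Int) × List Int :=
  let cs := raw_text.toList
  let n : Int := cs.length
  (PySem.List.pyRange 0 (n - seq_length) 1).foldl
    (fun (st : List (List Int) × List Int) i =>
      let sequence := PySem.List.slice cs (some i) (some (i + seq_length))
      let label := PySem.List.pyGet? cs (i + seq_length)
      (st.1 ++ [sequence.map (fun c => (pvLookup char_to_index c).getD 0)],
       st.2 ++ [(label.bind (fun c => pvLookup char_to_index c)).getD 0]))
    ([], [])

-- ===== PORT B =====
-- Literal port of Source B: guard, then ONE fold over the characters carrying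
-- (sequences, labels, window); a full window is emitted and rolled forward by one
-- ((window + [j])[1:] is `(… ).drop 1`, exact for a nonnegative start slice).
def create_sequence_and_label_alt (raw_text : String) (char_to_index : List (String × Int)) (seq_length : Int) : List (List Int) × List Int :=
  let cs := raw_text.toList
  let n : Int := cs.length
  if n ≤ seq_length then ([], [])
  else
    let st := cs.foldl
      (fun (st : List (List Int) × List Int × List Int) ch =>
        let j := (pvLookup char_to_index ch).getD 0
        if (st.2.2.length : Int) = seq_length then
          (st.1 ++ [st.2.2], st.2.1 ++ [j], (st.2.2 ++ [j]).drop 1)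
        else
          (st.1, st.2.1, st.2.2 ++ [j]))
      ([], [], [])
    (st.1, st.2.1)

-- ===== PRECONDITION & SPEC =====
-- Pre_ excludes exactly the inputs where Python A raises: KeyError when the loop runs and
-- some character of raw_text is not a key of char_to_index, and IndexError when
-- seq_length < -len(raw_text) (a label index wraps past the front of the string).
def Pre_create_sequence_and_label (raw_text : String) (char_to_index : List (String × Int)) (seq_length : Int) : Prop :=
  (raw_text.toList.length : Int) ≤ seq_length ∨
    (-(raw_text.toList.length : Int) ≤ seq_length ∧
      raw_text.toList.all (fun c => (pvLookup char_to_index c).isSome) = true)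
instance (raw_text : String) (char_to_index : List (String × Int)) (seq_length : Int) : Decidable (Pre_create_sequence_and_label raw_text char_to_index seq_length) := by unfold Pre_create_sequence_and_label; infer_instance

def pvWitness_create_sequence_and_label : String × (List (String × Int)) × Int :=
  ("abca", [("a", 0), ("b", 1), ("c", 2)], 2)

-- For negative seq_length with -seq_length ≤ len(raw_text), A returns accidental data
-- (mostly-empty windows from negative-length slices, labels via negative-index wraparound)
-- while B returns ([], []); no valid window of negative length exists, so B's is intended.
def D_create_sequence_and_label (raw_text : String) (char_to_index : List (String × Int)) (seq_length : Int) : Prop :=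
  seq_length < 0 ∧ -(raw_text.toList.length : Int) ≤ seq_length
instance (raw_text : String) (char_to_index : List (String × Int)) (seq_length : Int) : Decidable (D_create_sequence_and_label raw_text char_to_index seq_length) := by unfold D_create_sequence_and_label; infer_instance

def Spec_create_sequence_and_label (raw_text : String) (char_to_index : List (String × Int)) (seq_length : Int) (out : List (List Int) × List Int) : Prop := ¬ D_create_sequence_and_label raw_text char_to_index seq_length → out = create_sequence_and_label_alt raw_text char_to_index seq_length
instance (raw_text : String) (char_to_index : List (String × Int)) (seq_length : Int) (out : List (List Int) × List Int) : Decidable (Spec_create_sequence_and_label raw_text char_to_index seq_length out) := by unfold Spec_create_sequence_and_label; infer_instance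

def pvDiffWitness_create_sequence_and_label : String × (List (String × Int)) × Int :=
  ("ab", [("a", 0), ("b", 1)], -1)
def pvDiffWitnessOut_create_sequence_and_label : (List (List Int) × List Int) × (List (List Int) × List Int) :=
  (([[0], [], []], [1, 0, 1]), ([], []))

-- ===== CLAIM (what is proved, stated in full; the proofs are below) =====
def Claim_unchanged_create_sequence_and_label : Prop := ∀ (raw_text : String) (char_to_index : List (String × Int)) (seq_length : Int), Dom_create_sequence_and_label raw_text char_to_index seq_length → Pre_create_sequence_and_label raw_text char_to_index seq_length → Spec_create_sequence_and_label raw_text char_to_index seq_length (create_sequence_and_label raw_text char_to_index seq_length)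
def Claim_changed_create_sequence_and_label : Prop := Dom_create_sequence_and_label (pvDiffWitness_create_sequence_and_label.1) (pvDiffWitness_create_sequence_and_label.2.1) (pvDiffWitness_create_sequence_and_label.2.2) ∧ Pre_create_sequence_and_label (pvDiffWitness_create_sequence_and_label.1) (pvDiffWitness_create_sequence_and_label.2.1) (pvDiffWitness_create_sequence_and_label.2.2) ∧ D_create_sequence_and_label (pvDiffWitness_create_sequence_and_label.1) (pvDiffWitness_create_sequence_and_label.2.1) (pvDiffWitness_create_sequence_and_label.2.2) ∧ create_sequence_and_label (pvDiffWitness_create_sequence_and_label.1) (pvDiffWitness_create_sequence_and_label.2.1) (pvDiffWitness_create_sequence_and_label.2.2) = pvDiffWitnessOut_create_sequence_and_label.1 ∧ create_sequence_and_label_alt (pvDiffWitness_create_sequence_and_label.1) (pvDiffWitness_create_sequence_and_label.2.1) (pvDiffWitness_create_sequence_and_label.2.2) = pvDiffWitnessOut_create_sequence_and_label.2 ∧ pvDiffWitnessOut_create_sequence_and_label.1 ≠ pvDiffWitnessOut_create_sequence_and_label.2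
def Claim_exact_create_sequence_and_label : Prop := ∀ (raw_text : String) (char_to_index : List (String × Int)) (seq_length : Int), Dom_create_sequence_and_label raw_text char_to_index seq_length → Pre_create_sequence_and_label raw_text char_to_index seq_length → D_create_sequence_and_label raw_text char_to_index seq_length → create_sequence_and_label raw_text char_to_index seq_length ≠ create_sequence_and_label_alt raw_text char_to_index seq_length

-- ===== LEMMAS AND PROOFS =====

-- B's step function, abstracted over the totalised lookup f and a Nat window length k
def pvBStep (f : Char → Int) (k : Nat) (st : List (List Int) × List Int × List Int) (ch : Char) : List (List Int) × List Int × List Int :=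
  if st.2.2.length = k then
    (st.1 ++ [st.2.2], st.2.1 ++ [f ch], (st.2.2 ++ [f ch]).drop 1)
  else
    (st.1, st.2.1, st.2.2 ++ [f ch])

-- filling phase: while the window is short it only grows
theorem pvB_fill (f : Char → Int) (k : Nat) (l : List Char) :
    ∀ (S : List (List Int)) (L w : List Int), w.length + l.length ≤ k →
      l.foldl (pvBStep f k) (S, L, w) = (S, L, w ++ l.map f) := by
  induction l with
  | nil => intro S L w _; simp
  | cons ch rest ih =>
    intro S L w h
    simp only [List.length_cons] at h
    have hlt : w.length ≠ k := by omega
    simp only [List.foldl_cons, pvBStep, hlt, if_false]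
    rw [ih S L (w ++ [f ch]) (by simp; omega)]
    simp

-- emitting phase: with a full window, each step emits the window and rolls it forward
theorem pvB_full (f : Char → Int) (k : Nat) (l : List Char) :
    ∀ (S : List (List Int)) (L w : List Int), w.length = k →
      l.foldl (pvBStep f k) (S, L, w) =
        (S ++ (List.range l.length).map (fun i => ((w ++ l.map f).drop i).take k),
         L ++ l.map f, (w ++ l.map f).drop l.length) := by
  induction l with
  | nil => intro S L w _; simp
  | cons ch rest ih =>
    intro S L w hw
    simp only [List.foldl_cons]
    rw [show pvBStep f k (S, L, w) ch
        = (S ++ [w], L ++ [f ch], (w ++ [f ch]).drop 1) from by simp [pvBStep, hw]]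
    rw [ih (S ++ [w]) (L ++ [f ch]) ((w ++ [f ch]).drop 1) (by simp [hw])]
    have hcat : (w ++ [f ch]).drop 1 ++ rest.map f = (w ++ f ch :: rest.map f).drop 1 := by
      rw [show w ++ f ch :: rest.map f = (w ++ [f ch]) ++ rest.map f from by
        rw [List.append_assoc, List.singleton_append]]
      rw [List.drop_append_of_le_length (l₁ := w ++ [f ch]) (l₂ := rest.map f) (i := 1)
        (by simp)]
    simp only [hcat, List.drop_drop]
    refine Prod.ext ?_ (Prod.ext ?_ ?_) <;> simp only []
    · simp only [List.map_cons, List.length_cons, List.range_succ_eq_map, List.map_cons,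
        List.map_map, List.append_assoc, List.singleton_append]
      congr 1
      congr 1
      · exact (List.take_left' hw).symm
      · apply List.map_congr_left
        intro i _
        simp [Function.comp, Nat.succ_eq_add_one, Nat.add_comm]
    · simp
    · simp only [List.map_cons, List.length_cons, Nat.add_comm]

-- closed form of port B for 0 ≤ seq_length < n
theorem pvB_closed (raw_text : String) (char_to_index : List (String × Int)) (k : Nat)
    (hk : k < raw_text.toList.length) :
    create_sequence_and_label_alt raw_text char_to_index (k : Int) =
      ((List.range (raw_text.toList.length - k)).map
          (fun i => (((raw_text.toList.map (fun c => (pvLookup char_to_index c).getD 0)).drop i).take k)),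
       (raw_text.toList.drop k).map (fun c => (pvLookup char_to_index c).getD 0)) := by
  unfold create_sequence_and_label_alt
  set cs := raw_text.toList with hcs
  set f : Char → Int := fun c => (pvLookup char_to_index c).getD 0 with hf
  have hng : ¬ ((cs.length : Int) ≤ (k : Int)) := by exact_mod_cast Nat.not_le.mpr hk
  simp only [hng, if_false]
  have hstep : (fun (st : List (List Int) × List Int × List Int) ch =>
      let j := (pvLookup char_to_index ch).getD 0
      if (st.2.2.length : Int) = (k : Int) then
        (st.1 ++ [st.2.2], st.2.1 ++ [j], (st.2.2 ++ [j]).drop 1)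
      else
        (st.1, st.2.1, st.2.2 ++ [j])) = pvBStep f k := by
    funext st ch
    simp only [pvBStep, hf, Int.natCast_inj]
  rw [hstep]
  have hsplit : cs = cs.take k ++ cs.drop k := (List.take_append_drop k cs).symm
  conv_lhs => rw [hsplit]
  rw [List.foldl_append]
  rw [pvB_fill f k (cs.take k) [] [] [] (by simp)]
  simp only [List.nil_append]
  rw [pvB_full f k (cs.drop k) [] [] ((cs.take k).map f) (by simp; omega)]
  simp only [List.nil_append, ← List.map_append, List.take_append_drop, List.length_drop]

-- closed form of port A for 0 ≤ seq_length < n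
theorem pvA_closed (raw_text : String) (char_to_index : List (String × Int)) (k : Nat)
    (hk : k < raw_text.toList.length) :
    create_sequence_and_label raw_text char_to_index (k : Int) =
      ((List.range (raw_text.toList.length - k)).map
          (fun i => (((raw_text.toList.drop i).take k).map (fun c => (pvLookup char_to_index c).getD 0))),
       (raw_text.toList.drop k).map (fun c => (pvLookup char_to_index c).getD 0)) := by
  unfold create_sequence_and_label
  set cs := raw_text.toList with hcs
  set f : Char → Int := fun c => (pvLookup char_to_index c).getD 0 with hf
  rw [PySem.List.foldl_prod_mk
    (f := fun (s : List (List Int)) i =>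
      s ++ [(PySem.List.slice cs (some i) (some (i + (k : Int)))).map f])
    (g := fun (s : List Int) i =>
      s ++ [((PySem.List.pyGet? cs (i + (k : Int))).bind
        (fun c => pvLookup char_to_index c)).getD 0])]
  rw [PySem.List.foldl_append_singleton_eq_map, PySem.List.foldl_append_singleton_eq_map]
  have hrange : PySem.List.pyRange 0 ((cs.length : Int) - (k : Int)) 1
      = (List.range (cs.length - k)).map (fun (i : Nat) => (i : Int)) := by
    rw [PySem.List.pyRange_one]
    have h0 : ((cs.length : Int) - (k : Int) - 0).toNat = cs.length - k := by omega
    rw [h0]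
    apply List.map_congr_left
    intro i _
    simp
  rw [hrange]
  simp only [List.map_map, List.nil_append, Prod.mk.injEq]
  constructor
  · apply List.map_congr_left
    intro i hi
    simp only [Function.comp]
    rw [PySem.List.slice_natCast_add]
  · apply List.ext_getElem
    · simp
    intro i h1 h2
    simp only [List.length_map, List.length_range] at h1
    simp only [List.getElem_map, List.getElem_range, List.getElem_drop, Function.comp]
    have hik : ((i : Int) + (k : Int)) = ((i + k : Nat) : Int) := by push_cast; ring
    rw [hik, PySem.List.pyGet?_natCast, List.getElem?_eq_getElem (by omega)]
    simp [hf]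
    simp only [Nat.add_comm i k]

-- each iteration of A's fold appends exactly one sequence
theorem pvA_foldl_len (raw_text : String) (char_to_index : List (String × Int)) (seq_length : Int) :
    ∀ (l : List Int) (init : List (List Int) × List Int),
      (l.foldl (fun (st : List (List Int) × List Int) i =>
        (st.1 ++ [(PySem.List.slice raw_text.toList (some i) (some (i + seq_length))).map
            (fun c => (pvLookup char_to_index c).getD 0)],
         st.2 ++ [((PySem.List.pyGet? raw_text.toList (i + seq_length)).bind
            (fun c => pvLookup char_to_index c)).getD 0])) init).1.length
        = init.1.length + l.length := by
  intro l
  induction l with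
  | nil => intro init; simp
  | cons x rest ih =>
    intro init
    rw [List.foldl_cons, ih]
    simp
    omega

-- for a negative seq_length B's window test never fires, so nothing is ever emitted
theorem pvB_foldl_neg (cs : List Char) (char_to_index : List (String × Int)) (seq_length : Int)
    (hneg : seq_length < 0) :
    ∀ (S : List (List Int)) (L w : List Int),
      ((cs.foldl (fun (st : List (List Int) × List Int × List Int) ch =>
        let j := (pvLookup char_to_index ch).getD 0
        if (st.2.2.length : Int) = seq_length then
          (st.1 ++ [st.2.2], st.2.1 ++ [j], (st.2.2 ++ [j]).drop 1)
        else
          (st.1, st.2.1, st.2.2 ++ [j])) (S, L, w)).1 = S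
       ∧ (cs.foldl (fun (st : List (List Int) × List Int × List Int) ch =>
        let j := (pvLookup char_to_index ch).getD 0
        if (st.2.2.length : Int) = seq_length then
          (st.1 ++ [st.2.2], st.2.1 ++ [j], (st.2.2 ++ [j]).drop 1)
        else
          (st.1, st.2.1, st.2.2 ++ [j])) (S, L, w)).2.1 = L) := by
  induction cs with
  | nil => intro S L w; simp
  | cons ch rest ih =>
    intro S L w
    have hne : ¬ ((w.length : Int) = seq_length) := by
      have : (0 : Int) ≤ (w.length : Int) := by positivity
      omega
    simp only [List.foldl_cons, hne, if_false]
    exact ih S L (w ++ [(pvLookup char_to_index ch).getD 0])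

-- the ports agree for every nonnegative seq_length (D_ fails exactly on the negatives inside Pre_)
theorem pv_ports_eq_nonneg (raw_text : String) (char_to_index : List (String × Int)) (k : Nat) :
    create_sequence_and_label raw_text char_to_index (k : Int)
      = create_sequence_and_label_alt raw_text char_to_index (k : Int) := by
  set cs := raw_text.toList with hcs
  by_cases h : cs.length ≤ k
  · unfold create_sequence_and_label create_sequence_and_label_alt
    have h2 : ((raw_text.toList.length : Int) ≤ (k : Int)) := by
      rw [← hcs]; exact_mod_cast h
    have hnil : PySem.List.pyRange 0 ((raw_text.toList.length : Int) - (k : Int)) 1 = [] :=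
      PySem.List.pyRange_one_eq_nil (by omega)
    simp only [hnil, List.foldl_nil, h2, if_true]
  · have hk : k < cs.length := Nat.not_le.mp h
    rw [pvA_closed raw_text char_to_index k hk, pvB_closed raw_text char_to_index k hk]
    set f : Char → Int := fun c => (pvLookup char_to_index c).getD 0 with hf
    refine Prod.ext ?_ rfl
    apply List.map_congr_left
    intro i _
    rw [List.map_take, List.map_drop]

-- ===== VERDICT (by name: the statements are the Claim_ definitions above) =====
theorem create_sequence_and_label_spec : Claim_unchanged_create_sequence_and_label := by
  intro raw_text char_to_index seq_length _ hpre hnd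
  unfold D_create_sequence_and_label at hnd
  unfold Pre_create_sequence_and_label at hpre
  have hk : 0 ≤ seq_length := by
    rcases hpre with h | ⟨h, _⟩
    · have : (0 : Int) ≤ (raw_text.toList.length : Int) := by positivity
      omega
    · by_contra hneg
      exact hnd ⟨by omega, h⟩
  obtain ⟨k, rfl⟩ : ∃ k : Nat, seq_length = (k : Int) := ⟨seq_length.toNat, by omega⟩
  exact pv_ports_eq_nonneg raw_text char_to_index k

theorem create_sequence_and_label_changed : Claim_changed_create_sequence_and_label := by
  unfold Claim_changed_create_sequence_and_label; decide

theorem create_sequence_and_label_tight : Claim_exact_create_sequence_and_label := by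
  intro raw_text char_to_index seq_length _ _ hd
  unfold D_create_sequence_and_label at hd
  obtain ⟨hneg, hge⟩ := hd
  intro heq
  -- A's sequences list is nonempty (n - seq_length > 0 windows); B's is empty
  have hA : 0 < (create_sequence_and_label raw_text char_to_index seq_length).1.length := by
    unfold create_sequence_and_label
    rw [pvA_foldl_len]
    rw [PySem.List.length_pyRange_one]
    simp only [List.length_nil, Nat.zero_add]
    omega
  have hB : (create_sequence_and_label_alt raw_text char_to_index seq_length).1 = [] := by
    unfold create_sequence_and_label_alt
    have hng : ¬ ((raw_text.toList.length : Int) ≤ seq_length) := by omega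
    simp only [hng, if_false]
    rw [(pvB_foldl_neg raw_text.toList char_to_index seq_length hneg [] [] []).1]
  rw [heq, hB] at hA
  simp at hA
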